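-- pv_equiv track=rewrite | github.com/wyattbworld/AOC2025 | day2/part2.py | find_invalid_code
-- ===== SOURCE A (Python) =====
-- def find_invalid_code(code: str) -> bool:
--     if code.startswith('0'):
--         return True
--     for i in range(2, len(code)+1):
--         if len(code) % i != 0:
--             continue
--         first_piece = code[0:len(code)//i]
--         is_invalid = True
--         for j in range(len(code)//i, len(code), len(code)//i):
--             if code[j:j+len(code)//i] != first_piece:
--                 is_invalid = False
--                 break
--         if is_invalid:
--             return True
--     return False
-- ===== SOURCE B (Python) =====
-- def find_invalid_code(code: str) -> bool:
--     if code.startswith('0'):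
--         return True
--     # classic rotation trick: a non-empty string is a repetition of a shorter
--     # block iff it occurs inside (code+code) with both end characters removed
--     return code != "" and code in (code + code)[1:-1]
-- ===== Notes on version B (the rewrite author's own statement) =====
-- stated objective: idiomatic
-- what changed: A's divisor enumeration with chunk-by-chunk prefix comparison is replaced by the classic rotation trick: a non-empty string is periodic iff it occurs as a substring of (code+code)[1:-1], one C-level substring search instead of Python-level nested loops.
import Mathlib
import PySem

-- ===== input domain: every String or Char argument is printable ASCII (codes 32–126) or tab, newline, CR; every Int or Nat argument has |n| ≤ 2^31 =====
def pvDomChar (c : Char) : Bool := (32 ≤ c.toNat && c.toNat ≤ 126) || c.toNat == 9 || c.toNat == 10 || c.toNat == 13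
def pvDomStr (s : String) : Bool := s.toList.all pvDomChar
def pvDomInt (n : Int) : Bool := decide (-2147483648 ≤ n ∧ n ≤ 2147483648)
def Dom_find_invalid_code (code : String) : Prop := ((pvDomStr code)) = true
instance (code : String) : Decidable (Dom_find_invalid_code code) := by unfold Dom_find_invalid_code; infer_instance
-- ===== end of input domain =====

-- B replaces A's divisor-enumeration with chunk comparison by the classic rotation
-- trick: a non-empty string is periodic iff it occurs inside (code+code)[1:-1]
-- (objective: idiomatic one-liner; one substring search instead of nested loops).


-- ===== PORT A =====
-- literal transliteration of A: outer loop over piece counts i, inner loop over chunk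
-- starts j with early break folded into the Bool state (a broken-out False stays False).
def find_invalid_code (code : String) : Bool :=
  if PySem.Str.startswith code "0" then true
  else
    (PySem.List.pyRange 2 (PySem.Str.len code + 1) 1).foldl
      (fun found i =>
        found ||
          (PySem.Int.mod (PySem.Str.len code) i == 0 &&
            (PySem.List.pyRange (PySem.Int.floordiv (PySem.Str.len code) i) (PySem.Str.len code)
                (PySem.Int.floordiv (PySem.Str.len code) i)).foldl
              (fun isInvalid j =>
                isInvalid &&
                  (PySem.Str.slice code (some j) (some (j + PySem.Int.floordiv (PySem.Str.len code) i)) ==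
                    PySem.Str.slice code (some 0) (some (PySem.Int.floordiv (PySem.Str.len code) i))))
              true))
      false

-- ===== PORT B =====
-- literal transliteration of B: 'code != "" and code in (code + code)[1:-1]'
def find_invalid_code_alt (code : String) : Bool :=
  if PySem.Str.startswith code "0" then true
  else (code != "") && PySem.Str.isIn code (PySem.Str.slice (code ++ code) (some 1) (some (-1)))

-- ===== PRECONDITION & SPEC =====
def Spec_find_invalid_code (code : String) (out : Bool) : Prop := out = find_invalid_code_alt code
instance (code : String) (out : Bool) : Decidable (Spec_find_invalid_code code out) := by unfold Spec_find_invalid_code; infer_instance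

-- ===== CLAIM (what is proved, stated in full; the proofs are below) =====
def Claim_equal_find_invalid_code : Prop := ∀ (code : String), Dom_find_invalid_code code → Spec_find_invalid_code code (find_invalid_code code)

-- ===== LEMMAS AND PROOFS =====

-- a for-loop accumulating 'found = found or test(x)' is any()
theorem pvFoldlOr {α : Type} (l : List α) (f : α → Bool) (b : Bool) :
    l.foldl (fun acc x => acc || f x) b = (b || l.any f) := by
  induction l generalizing b with
  | nil => simp
  | cons x t ih => simp [List.any_cons, ih, Bool.or_assoc]

-- a for-loop accumulating 'ok = ok and test(x)' (A's break-early inner loop) is all()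
theorem pvFoldlAnd {α : Type} (l : List α) (f : α → Bool) (b : Bool) :
    l.foldl (fun acc x => acc && f x) b = (b && l.all f) := by
  induction l generalizing b with
  | nil => simp
  | cons x t ih => simp [List.all_cons, ih, Bool.and_assoc]

-- one chunk of A equals the first chunk iff the corresponding positions agree
theorem pvChunkPoint (s : List Char) (q k : Nat) :
    ((s.drop (k * q)).take q = s.take q) ↔ ∀ j < q, s[k * q + j]? = s[j]? := by
  constructor
  · intro h j hj
    have := congrArg (fun l => l[j]?) h
    simpa [List.getElem?_take_of_lt hj, List.getElem?_drop] using this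
  · intro h
    apply List.ext_getElem?
    intro i
    by_cases hi : i < q
    · simp [List.getElem?_take_of_lt hi, List.getElem?_drop, h i hi]
    · simp [hi]

-- all chunks equal the first chunk iff s is pointwise periodic with period q
theorem pvAllChunksIff (s : List Char) (q m : Nat) (hq : 0 < q) (hn : s.length = m * q) :
    (∀ k, 1 ≤ k → k < m → (s.drop (k * q)).take q = s.take q) ↔
      (∀ i < s.length, s[i]? = s[i % q]?) := by
  constructor
  · intro h i hi
    have hjq : i % q < q := Nat.mod_lt _ hq
    have hij : i / q * q + i % q = i := by rw [Nat.mul_comm]; exact Nat.div_add_mod i q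
    by_cases hk0 : i / q = 0
    · rw [hk0, Nat.zero_mul, Nat.zero_add] at hij
      rw [hij]
    · have hkm : i / q < m := (Nat.div_lt_iff_lt_mul hq).mpr (by omega)
      have hc := (pvChunkPoint s q (i / q)).mp (h (i / q) (Nat.pos_of_ne_zero hk0) hkm) (i % q) hjq
      rw [hij] at hc
      exact hc
  · intro h k hk1 hkm
    refine (pvChunkPoint s q k).mpr ?_
    intro j hj
    have hlt : k * q + j < s.length := by nlinarith
    have := h (k * q + j) hlt
    rw [this, Nat.mul_comm, Nat.mul_add_mod, Nat.mod_eq_of_lt hj]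

-- A's inner-loop range is exactly the chunk starts k*q, 1 ≤ k < m
theorem pvInnerMem (q m n : Nat) (hq : 0 < q) (hn : n = m * q) (j : Int) :
    j ∈ PySem.List.pyRange (q : Int) (n : Int) (q : Int) ↔
      ∃ k : Nat, 1 ≤ k ∧ k < m ∧ j = ((k * q : Nat) : Int) := by
  rw [PySem.List.mem_pyRange_iff_of_pos (by exact_mod_cast hq)]
  constructor
  · rintro ⟨h1, h2, t, ht⟩
    have ht0 : 0 ≤ t := by nlinarith
    lift t to Nat using ht0 with u
    refine ⟨u + 1, by omega, ?_, ?_⟩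
    · have hj : j = ((u + 1) * q : Nat) := by push_cast; linarith
      rw [hj] at h2
      have h2' : (u + 1) * q < m * q := by exact_mod_cast (by omega : (((u+1)*q : Nat) : Int) < ((m*q : Nat) : Int))
      exact Nat.lt_of_mul_lt_mul_right h2'
    · push_cast
      linarith
  · rintro ⟨k, hk1, hkm, rfl⟩
    have hle : q ≤ k * q := Nat.le_mul_of_pos_left q (by omega)
    have hlt : k * q < m * q := (Nat.mul_lt_mul_right hq).mpr hkm
    refine ⟨by exact_mod_cast hle, by rw [hn]; exact_mod_cast hlt, ⟨(k : Int) - 1, by push_cast; ring⟩⟩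

-- characterization of A: leading zero, or a proper divisor period q (pointwise form)
theorem pvAIff (code : String) :
    find_invalid_code code = true ↔
      (PySem.Str.startswith code "0" = true ∨
        ∃ q : Nat, 1 ≤ q ∧ q < code.toList.length ∧ q ∣ code.toList.length ∧
          ∀ i < code.toList.length, code.toList[i]? = code.toList[i % q]?) := by
  unfold find_invalid_code
  by_cases h0 : PySem.Str.startswith code "0" = true
  · rw [if_pos h0]
    exact iff_of_true rfl (Or.inl h0)
  · have h0' : PySem.Str.startswith code "0" = false := by
      cases h : PySem.Str.startswith code "0" <;> simp_all
    rw [if_neg h0, pvFoldlOr, Bool.false_or, List.any_eq_true]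
    simp only [h0', Bool.false_eq_true, false_or]
    rw [PySem.Str.len_eq]
    constructor
    · rintro ⟨i, hi, hb⟩
      rw [PySem.List.mem_pyRange_one] at hi
      rw [Bool.and_eq_true, beq_iff_eq, PySem.Int.mod_eq_zero_iff_dvd] at hb
      obtain ⟨hdvd, hinner⟩ := hb
      lift i to Nat using (by omega) with m
      have hm2 : 2 ≤ m := by exact_mod_cast hi.1
      have hmN : m ≤ code.toList.length := by exact_mod_cast (by omega : (m : Int) ≤ (code.toList.length : Int))
      have hdvd' : m ∣ code.toList.length := by exact_mod_cast hdvd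
      obtain ⟨q, hq⟩ := hdvd'
      have hq0 : 0 < q := by
        rcases Nat.eq_zero_or_pos q with h | h
        · exfalso; rw [h, Nat.mul_zero] at hq; omega
        · exact h
      have hfd : PySem.Int.floordiv (code.toList.length : Int) (m : Int) = (q : Int) := by
        rw [PySem.Int.floordiv_natCast, hq, Nat.mul_div_cancel_left _ (by omega)]
      rw [hfd, pvFoldlAnd, Bool.true_and, List.all_eq_true] at hinner
      have hqn : q < code.toList.length :=
        calc q < 2 * q := by omega
          _ ≤ m * q := Nat.mul_le_mul_right q hm2
          _ = code.toList.length := hq.symm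
      refine ⟨q, by omega, hqn, ⟨m, by rw [hq, Nat.mul_comm]⟩, ?_⟩
      rw [← pvAllChunksIff code.toList q m hq0 hq]
      intro k hk1 hkm
      have hmem : ((k * q : Nat) : Int) ∈
          PySem.List.pyRange (q : Int) (code.toList.length : Int) (q : Int) :=
        (pvInnerMem q m code.toList.length hq0 hq _).mpr ⟨k, hk1, hkm, rfl⟩
      have hsl := hinner _ hmem
      rw [beq_iff_eq, ← String.toList_inj] at hsl
      simp only [PySem.Str.toList_slice, PySem.Chars.slice_eq_listSlice] at hsl
      rw [PySem.List.slice_natCast_add] at hsl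
      rw [PySem.List.slice_zero_start, PySem.List.slice_to_natCast] at hsl
      exact hsl
    · rintro ⟨q, hq1, hqn, hdvd, hpw⟩
      obtain ⟨m, hm⟩ := hdvd
      have hm2 : 2 ≤ m := by
        by_contra h
        interval_cases m <;> omega
      refine ⟨(m : Int), ?_, ?_⟩
      · rw [PySem.List.mem_pyRange_one]
        have hmn : m ≤ code.toList.length := by
          rw [hm]; exact Nat.le_mul_of_pos_left m (by omega)
        constructor
        · exact_mod_cast hm2
        · have : (m : Int) ≤ (code.toList.length : Int) := by exact_mod_cast hmn
          omega
      · rw [Bool.and_eq_true, beq_iff_eq, PySem.Int.mod_eq_zero_iff_dvd]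
        have hfd : PySem.Int.floordiv (code.toList.length : Int) (m : Int) = (q : Int) := by
          rw [PySem.Int.floordiv_natCast, hm, Nat.mul_div_cancel _ (by omega)]
        have hmd : m ∣ code.toList.length := ⟨q, by rw [hm, Nat.mul_comm]⟩
        refine ⟨by exact_mod_cast hmd, ?_⟩
        rw [hfd, pvFoldlAnd, Bool.true_and, List.all_eq_true]
        intro j hj
        rw [pvInnerMem q m code.toList.length (by omega) (by rw [hm, Nat.mul_comm]) j] at hj
        obtain ⟨k, hk1, hkm, rfl⟩ := hj
        have hchunk := (pvAllChunksIff code.toList q m (by omega) (by rw [hm, Nat.mul_comm])).mpr hpw k hk1 hkm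
        rw [beq_iff_eq, ← String.toList_inj]
        simp only [PySem.Str.toList_slice, PySem.Chars.slice_eq_listSlice]
        rw [PySem.List.slice_natCast_add, PySem.List.slice_zero_start, PySem.List.slice_to_natCast]
        exact hchunk

-- indexing into s++s wraps around modulo the length of s
theorem pvDoubleGet (s : List Char) (k i : Nat) (hk : k ≤ s.length) (hi : i < s.length) :
    (s ++ s)[k + i]? = s[(i + k) % s.length]? := by
  rw [List.getElem?_append]
  by_cases h : k + i < s.length
  · rw [if_pos h, Nat.mod_eq_of_lt (by omega)]
    congr 1
    omega
  · rw [if_neg h]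
    have h1 : s.length ≤ i + k := by omega
    rw [Nat.mod_eq_sub_mod h1, Nat.mod_eq_of_lt (by omega)]
    congr 1
    omega

-- occurrence of s at offset k in s++s is exactly rotation-invariance by k
theorem pvOccIffRot (s : List Char) (k : Nat) (hk : k ≤ s.length) :
    (((s ++ s).drop k).take s.length = s) ↔
      ∀ i < s.length, s[(i + k) % s.length]? = s[i]? := by
  constructor
  · intro h i hi
    have := congrArg (fun l => l[i]?) h
    simp only [List.getElem?_take_of_lt hi, List.getElem?_drop] at this
    rw [← pvDoubleGet s k i hk hi, this]
  · intro h
    apply List.ext_getElem?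
    intro i
    by_cases hi : i < s.length
    · rw [List.getElem?_take_of_lt hi, List.getElem?_drop, pvDoubleGet s k i hk hi, h i hi]
    · rw [List.getElem?_take, if_neg hi, eq_comm, List.getElem?_eq_none_iff]
      omega

-- characterization of B: leading zero, or s occurs in (s++s) at a proper offset
theorem pvBIff (code : String) :
    find_invalid_code_alt code = true ↔
      (PySem.Str.startswith code "0" = true ∨
        ∃ k : Nat, 1 ≤ k ∧ k < code.toList.length ∧
          ∀ i < code.toList.length, code.toList[(i + k) % code.toList.length]? = code.toList[i]?) := by
  unfold find_invalid_code_alt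
  by_cases h0 : PySem.Str.startswith code "0" = true
  · rw [if_pos h0]
    exact iff_of_true rfl (Or.inl h0)
  · have h0' : PySem.Str.startswith code "0" = false := by
      cases h : PySem.Str.startswith code "0" <;> simp_all
    rw [if_neg h0]
    simp only [h0', Bool.false_eq_true, false_or]
    set s := code.toList with hs
    set n := s.length with hn
    by_cases hc : s = []
    · have hce : code = "" := String.toList_inj.mp (by rw [← hs, hc]; simp)
      have hn0 : n = 0 := by rw [hn, hc]; simp
      have hbne : (code != "") = false := by rw [hce]; simp
      rw [hbne, Bool.false_and]
      constructor
      · intro h; exact absurd h (by simp)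
      · rintro ⟨k, hk1, hkn, _⟩; omega
    · have hn1 : 1 ≤ n := by rw [hn]; exact List.length_pos_iff.mpr hc
      have hne : (code != "") = true := by
        simp only [bne_iff_ne, ne_eq]
        intro hq; rw [hq] at hs; simp [hs] at hc
      rw [hne, Bool.true_and]
      -- the sliced middle of the doubled string
      have hT : (PySem.Str.slice (code ++ code) (some 1) (some (-1))).toList
          = ((s ++ s).drop 1).take (n + n - 2) := by
        rw [PySem.Str.toList_slice, String.toList_append, ← hs]
        show PySem.List.slice (s ++ s) (some 1) (some (-1)) = _
        simp only [PySem.List.slice, PySem.List.clampIdx_neg_one]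
        have h1 : PySem.List.clampIdx (s ++ s).length 1 = 1 := by
          simp [PySem.List.clampIdx]
          omega
        rw [h1]
        simp [← hn]
        omega
      rw [PySem.Str.isIn_eq, ← hs, ← (PySem.Chars.exists_prefix_drop_iff_isIn s _), hT]
      constructor
      · rintro ⟨j, hj⟩
        have hjlen := hj.length_le
        rw [List.length_drop, List.length_take, List.length_drop, List.length_append, ← hn] at hjlen
        have hj2 : j ≤ n - 2 := by omega
        rw [List.drop_take, List.drop_drop] at hj
        rw [List.prefix_iff_eq_take, List.take_take, ← hn] at hj
        have hmin : min n (n + n - 2 - j) = n := by omega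
        rw [hmin] at hj
        refine ⟨j + 1, by omega, by omega, ?_⟩
        rw [← pvOccIffRot s (j + 1) (by omega), ← hn,
          show j + 1 = 1 + j by omega]
        exact hj.symm
      · rintro ⟨k, hk1, hkn, hrot⟩
        refine ⟨k - 1, ?_⟩
        have hocc := (pvOccIffRot s k (by omega)).mpr hrot
        rw [← hn] at hocc
        rw [List.drop_take, List.drop_drop, List.prefix_iff_eq_take, List.take_take, ← hn]
        have hmin : min n (n + n - 2 - (k - 1)) = n := by omega
        rw [hmin, show 1 + (k - 1) = k by omega, hocc]

-- a divisor period q yields rotation-invariance by q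
theorem pvPWtoRot (s : List Char) (q : Nat) (hdvd : q ∣ s.length) (hpw : ∀ i < s.length, s[i]? = s[i % q]?) :
    ∀ i < s.length, s[(i + q) % s.length]? = s[i]? := by
  intro i hi
  have hn : 0 < s.length := by omega
  have h1 : (i + q) % s.length < s.length := Nat.mod_lt _ hn
  rw [hpw _ h1, Nat.mod_mod_of_dvd _ hdvd, Nat.add_mod_right, ← hpw i hi]

-- rotation-invariance by k iterates to every multiple of k
theorem pvRotIter (s : List Char) (k : Nat) (hrot : ∀ i < s.length, s[(i + k) % s.length]? = s[i]?) :
    ∀ a, ∀ i < s.length, s[(i + a * k) % s.length]? = s[i]? := by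
  intro a
  induction a with
  | zero => intro i hi; simp [Nat.mod_eq_of_lt hi]
  | succ a ih =>
    intro i hi
    have hn : 0 < s.length := by omega
    have h1 : (i + a * k) % s.length < s.length := Nat.mod_lt _ hn
    have := hrot _ h1
    rw [Nat.mod_add_mod] at this
    rw [show i + (a + 1) * k = i + a * k + k by ring, this, ih i hi]

-- Bézout: some multiple of k is congruent to gcd(k,n) modulo n
theorem pvBezout (k n : Nat) (hk1 : 1 ≤ k) (hkn : k < n) :
    ∃ a : Nat, (a * k) % n = Nat.gcd k n := by
  have hn : 0 < n := by omega
  set g := Nat.gcd k n with hg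
  have hgk : g ∣ k := Nat.gcd_dvd_left k n
  have hgle : g ≤ k := Nat.le_of_dvd (by omega) hgk
  have hb := Nat.gcd_eq_gcd_ab k n
  set x := Nat.gcdA k n
  set y := Nat.gcdB k n
  refine ⟨(x % (n : Int)).toNat, ?_⟩
  have hxm : (0:Int) ≤ x % (n:Int) := Int.emod_nonneg x (by exact_mod_cast hn.ne')
  have hcast : (((x % (n:Int)).toNat : Int)) = x % (n:Int) := Int.toNat_of_nonneg hxm
  have key : (((x % (n:Int)).toNat * k : Nat) : Int) % n = (g : Int) := by
    push_cast
    rw [hcast]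
    calc (x % (n:Int) * (k:Int)) % n = (x * k) % n := by
          rw [Int.mul_emod, Int.emod_emod_of_dvd _ dvd_rfl, ← Int.mul_emod]
      _ = ((g:Int) - n * y) % n := by rw [hb]; ring_nf
      _ = (g:Int) % n := by rw [Int.sub_mul_emod_self_left]
      _ = (g:Int) := Int.emod_eq_of_lt (by positivity) (by exact_mod_cast lt_of_le_of_lt hgle hkn)
  have := key
  rw [← Int.natCast_mod] at this
  exact_mod_cast this

-- rotation-invariance by k yields a divisor period g = gcd k n
theorem pvRotToPW (s : List Char) (k : Nat) (hk1 : 1 ≤ k) (hkn : k < s.length)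
    (hrot : ∀ i < s.length, s[(i + k) % s.length]? = s[i]?) :
    ∃ q : Nat, 1 ≤ q ∧ q < s.length ∧ q ∣ s.length ∧
      ∀ i < s.length, s[i]? = s[i % q]? := by
  set n := s.length with hn
  set g := Nat.gcd k n with hg
  have hg1 : 1 ≤ g := Nat.gcd_pos_of_pos_left n (by omega)
  have hgn : g < n := lt_of_le_of_lt (Nat.le_of_dvd (by omega) (Nat.gcd_dvd_left k n)) hkn
  have hgd : g ∣ n := Nat.gcd_dvd_right k n
  obtain ⟨a, ha⟩ := pvBezout k n hk1 hkn
  have hrotg : ∀ i < n, s[(i + g) % n]? = s[i]? := by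
    intro i hi
    have h2 := pvRotIter s k hrot a i hi
    rw [← hn] at h2
    rw [← hg] at ha
    rw [← h2, ← ha, Nat.add_mod_mod]
  refine ⟨g, hg1, hgn, hgd, ?_⟩
  intro i
  induction i using Nat.strong_induction_on with
  | _ i ih =>
    intro hi
    by_cases hig : i < g
    · rw [Nat.mod_eq_of_lt hig]
    · have hj : i - g < n := by omega
      have := hrotg (i - g) hj
      rw [Nat.sub_add_cancel (by omega), Nat.mod_eq_of_lt hi] at this
      rw [this, ih (i - g) (by omega) hj]
      congr 1
      conv_rhs => rw [show i = g + (i - g) by omega]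
      rw [Nat.add_mod_left]

-- ===== VERDICT (by name: the statement is the Claim_ definition above) =====
theorem find_invalid_code_spec : Claim_equal_find_invalid_code := by
  intro code _
  unfold Spec_find_invalid_code
  rw [Bool.eq_iff_iff, pvAIff, pvBIff]
  constructor
  · rintro (h0 | ⟨q, hq1, hqn, hdvd, hpw⟩)
    · exact Or.inl h0
    · exact Or.inr ⟨q, hq1, hqn, pvPWtoRot code.toList q hdvd hpw⟩
  · rintro (h0 | ⟨k, hk1, hkn, hrot⟩)
    · exact Or.inl h0
    · exact Or.inr (pvRotToPW code.toList k hk1 hkn hrot)
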